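-- pv_equiv track=rewrite | github.com/motokikando/code_algorithm | code_test/list_plus_one.py | list_to_int_plus_one
-- ===== SOURCE A (Python) =====
-- from typing import List
--
-- def remove_zero(numbers: List[int]) -> None:
--     if numbers and numbers[0] == 0:
--         numbers.pop(0)
--         remove_zero(numbers)
--
-- def list_to_int(numbers: List[int]) -> int:
--     sum_numbers = 0
--     for i, num in enumerate(reversed(numbers)):
--         sum_numbers += num * (10**i)
--     return sum_numbers
--
-- def list_to_int_plus_one(numbers: List[int]) -> int:
--     i = len(numbers) - 1
--     numbers[i] += 1
--     while 0 < i: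
--         if numbers[i] != 10:
--             remove_zero(numbers)
--             break
--         numbers[i] = 0
--         numbers[i-1] += 1
--         i -= 1
--     else:
--         if numbers[0] == 10:
--             numbers[0] = 1
--             numbers.append(0)
--
--     return list_to_int(numbers)
-- ===== SOURCE B (Python) =====
-- def list_to_int_plus_one(numbers):
--     value = 0
--     for d in numbers:
--         value = value * 10 + d
--     return value + 1
-- ===== Notes on version B (the rewrite author's own statement) =====
-- stated objective: simpler
-- what changed: Replaces A's in-place carry-propagation loop plus recursive leading-zero stripping plus positional 10**i re-conversion with a single Horner fold that converts the digit list to an integer and adds one.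
import Mathlib
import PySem

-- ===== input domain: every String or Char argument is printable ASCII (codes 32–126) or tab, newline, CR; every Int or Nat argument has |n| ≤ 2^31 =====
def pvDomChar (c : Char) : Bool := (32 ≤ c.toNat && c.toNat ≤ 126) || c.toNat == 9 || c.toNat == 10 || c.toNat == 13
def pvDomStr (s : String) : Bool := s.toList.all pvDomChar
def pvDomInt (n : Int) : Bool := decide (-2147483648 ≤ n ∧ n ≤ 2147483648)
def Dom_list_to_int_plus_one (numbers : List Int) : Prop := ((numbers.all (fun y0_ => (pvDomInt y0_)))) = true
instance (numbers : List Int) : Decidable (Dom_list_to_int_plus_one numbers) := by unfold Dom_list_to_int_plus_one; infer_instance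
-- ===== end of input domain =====

-- B replaces A's in-place carry loop + zero stripping + re-conversion by one Horner fold
-- plus one ("simpler"); A mutates its argument, B does not — the claim is about the RETURN value only.

-- ===== PORT A =====
-- remove_zero: pops leading zeros recursively (ported functionally: returns the stripped list)
def pvRemoveZero : List Int → List Int
  | [] => []
  | n :: rest => if n = 0 then pvRemoveZero rest else n :: rest

-- list_to_int: sum num * 10**i over enumerate(reversed(numbers)); i ≥ 0 always, so .toNat is exact
def pvListToInt (numbers : List Int) : Int :=
  (PySem.List.enumerate numbers.reverse 0).foldl (fun s p => s + p.2 * 10 ^ p.1.toNat) 0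

-- the while-loop of A, recursing on i exactly as the Python decrements it
def pvCarryLoop : List Int → Nat → List Int
  | numbers, 0 =>
      -- while-else branch: i = 0
      if numbers.getD 0 0 = 10 then (numbers.set 0 1) ++ [0] else numbers
  | numbers, i+1 =>
      if numbers.getD (i+1) 0 ≠ 10 then pvRemoveZero numbers
      else pvCarryLoop ((numbers.set (i+1) 0).set i ((numbers.set (i+1) 0).getD i 0 + 1)) i

def list_to_int_plus_one (numbers : List Int) : Int :=
  -- numbers[-1] += 1 raises IndexError on []: Pre_ excludes the empty list, so i = len-1 is in range
  let i := numbers.length - 1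
  let ns := numbers.set i (numbers.getD i 0 + 1)
  pvListToInt (pvCarryLoop ns i)

-- ===== PORT B =====
def list_to_int_plus_one_alt (numbers : List Int) : Int :=
  numbers.foldl (fun value d => value * 10 + d) 0 + 1

-- ===== PRECONDITION & SPEC =====
-- Pre_: the Python A raises IndexError (numbers[-1]) exactly on the empty list.
def Pre_list_to_int_plus_one (numbers : List Int) : Prop := numbers ≠ []
instance (numbers : List Int) : Decidable (Pre_list_to_int_plus_one numbers) := by unfold Pre_list_to_int_plus_one; infer_instance
def pvWitness_list_to_int_plus_one : List Int := [1, 9, 9]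

def Spec_list_to_int_plus_one (numbers : List Int) (out : Int) : Prop := out = list_to_int_plus_one_alt numbers
instance (numbers : List Int) (out : Int) : Decidable (Spec_list_to_int_plus_one numbers out) := by unfold Spec_list_to_int_plus_one; infer_instance

-- ===== CLAIM (what is proved, stated in full; the proofs are below) =====
def Claim_equal_list_to_int_plus_one : Prop := ∀ (numbers : List Int), Dom_list_to_int_plus_one numbers → Pre_list_to_int_plus_one numbers → Spec_list_to_int_plus_one numbers (list_to_int_plus_one numbers)

-- ===== LEMMAS AND PROOFS =====

-- H: the Horner fold of B, the common value both programs compute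
def pvH (a : Int) (xs : List Int) : Int := xs.foldl (fun value d => value * 10 + d) a

theorem pvH_nil (a : Int) : pvH a [] = a := rfl
theorem pvH_cons (a d : Int) (t : List Int) : pvH a (d :: t) = pvH (a * 10 + d) t := rfl

theorem pvH_init (xs : List Int) : ∀ a : Int, pvH a xs = a * 10 ^ xs.length + pvH 0 xs := by
  induction xs with
  | nil => intro a; simp [pvH_nil]
  | cons d t ih =>
      intro a
      rw [pvH_cons, pvH_cons, ih (a * 10 + d), ih (0 * 10 + d)]
      simp [List.length_cons, pow_succ]
      ring

theorem pvH_append_singleton (xs : List Int) (d : Int) :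
    pvH 0 (xs ++ [d]) = pvH 0 xs * 10 + d := by
  simp [pvH, List.foldl_append]

theorem pvListToInt_eq_pvH (xs : List Int) : pvListToInt xs = pvH 0 xs := by
  induction xs with
  | nil => rfl
  | cons d t ih =>
      have hrev : (d :: t).reverse = t.reverse ++ [d] := by simp
      have henum : PySem.List.enumerate ((d :: t).reverse) 0
          = PySem.List.enumerate t.reverse 0 ++ [((0 : Int) + t.reverse.length, d)] := by
        rw [hrev, PySem.List.enumerate_append]; rfl
      unfold pvListToInt
      rw [henum, List.foldl_append]
      simp only [List.foldl_cons, List.foldl_nil]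
      have : pvListToInt t = pvH 0 t := ih
      unfold pvListToInt at this
      rw [this]
      have hlen : ((0 : Int) + (t.reverse.length : Int)).toNat = t.length := by simp
      rw [hlen, pvH_cons, pvH_init t (0 * 10 + d)]
      ring

theorem pvH_removeZero (xs : List Int) : pvH 0 (pvRemoveZero xs) = pvH 0 xs := by
  induction xs with
  | nil => rfl
  | cons n rest ih =>
      by_cases h : n = 0
      · subst h; simpa [pvRemoveZero, pvH_cons] using ih
      · simp [pvRemoveZero, h]

theorem pvH_set (xs : List Int) : ∀ (k : Nat) (v : Int), k < xs.length →
    pvH 0 (xs.set k v) = pvH 0 xs + (v - xs.getD k 0) * 10 ^ (xs.length - 1 - k) := by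
  induction xs with
  | nil => intro k v h; simp at h
  | cons x t ih =>
      intro k v h
      cases k with
      | zero =>
          simp only [List.set_cons_zero, List.getD_cons_zero, List.length_cons,
            Nat.add_sub_cancel, Nat.sub_zero]
          rw [pvH_cons, pvH_cons, pvH_init t (0 * 10 + v), pvH_init t (0 * 10 + x)]
          ring
      | succ k =>
          simp only [List.set_cons_succ, List.getD_cons_succ, List.length_cons]
          rw [pvH_cons, pvH_cons, pvH_init (t.set k v) (0 * 10 + x),
            pvH_init t (0 * 10 + x), List.length_set,
            ih k v (by simp only [List.length_cons] at h; omega)]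
          have : t.length + 1 - 1 - (k + 1) = t.length - 1 - k := by omega
          rw [this]
          ring

theorem pvH_all_zero (xs : List Int) (hz : ∀ y ∈ xs, y = 0) :
    ∀ a : Int, pvH a xs = a * 10 ^ xs.length := by
  induction xs with
  | nil => intro a; simp [pvH_nil]
  | cons x t ih =>
      intro a
      have hx : x = 0 := hz x (by simp)
      rw [pvH_cons, ih (fun y hy => hz y (by simp [hy])) (a * 10 + x), hx]
      simp [List.length_cons, pow_succ]
      ring

theorem pvCarryLoop_value : ∀ (i : Nat) (xs : List Int), i < xs.length →
    (∀ (j : Nat), j < xs.length → i < j → xs.getD j 0 = 0) →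
    pvH 0 (pvCarryLoop xs i) = pvH 0 xs := by
  intro i
  induction i with
  | zero =>
      intro xs hlen hz
      match xs, hlen with
      | x :: t, _ =>
        have htz : ∀ y ∈ t, y = 0 := by
          intro y hy
          obtain ⟨j, hj, rfl⟩ := List.mem_iff_getElem.mp hy
          have := hz (j + 1) (by simp only [List.length_cons]; omega) (by omega)
          simpa [List.getD, List.getElem?_cons_succ, List.getElem?_eq_getElem hj] using this
        by_cases hx : x = 10
        · subst hx
          have hstep : pvCarryLoop (10 :: t) 0 = 1 :: (t ++ [0]) := by
            simp [pvCarryLoop]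
          rw [hstep, ← List.cons_append, pvH_append_singleton, pvH_cons, pvH_cons, pvH_all_zero t htz, pvH_all_zero t htz]
          ring
        · simp [pvCarryLoop, hx]
  | succ k ih =>
      intro xs hlen hz
      by_cases h10 : xs.getD (k + 1) 0 = 10
      · have hk1 : k + 1 < xs.length := hlen
        simp only [pvCarryLoop, h10, ne_eq, not_true_eq_false, if_false]
        set ys := (xs.set (k+1) 0).set k ((xs.set (k+1) 0).getD k 0 + 1) with hys
        have hylen : ys.length = xs.length := by simp [hys]
        have hyz : ∀ (j : Nat), j < ys.length → k < j → ys.getD j 0 = 0 := by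
          intro j hj hkj
          rw [hylen] at hj
          by_cases hjk1 : j = k + 1
          · subst hjk1
            simp [hys, List.getD, hk1]
          · have hgt : k + 1 < j := by omega
            have h1 : ys.getD j 0 = xs.getD j 0 := by
              simp [hys, List.getD, Nat.ne_of_lt (by omega : k < j), Ne.symm hjk1]
            rw [h1]; exact hz j hj hgt
        rw [ih ys (by omega) hyz]
        have hset1 : pvH 0 (xs.set (k+1) 0)
            = pvH 0 xs + (0 - 10) * 10 ^ (xs.length - 1 - (k+1)) := by
          rw [pvH_set xs (k+1) 0 hk1, h10]
        have hklen : k < (xs.set (k+1) 0).length := by simp; omega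
        rw [hys, pvH_set _ k _ hklen, hset1]
        have hlen2 : (xs.set (k+1) 0).length = xs.length := by simp
        rw [hlen2]
        have hexp : xs.length - 1 - k = (xs.length - 1 - (k+1)) + 1 := by omega
        rw [hexp, pow_succ]
        ring
      · simp only [pvCarryLoop, h10, ne_eq, not_false_eq_true, if_true]
        exact pvH_removeZero xs

-- ===== VERDICT (by name: the statement is the Claim_ definition above) =====
theorem list_to_int_plus_one_spec : Claim_equal_list_to_int_plus_one := by
  intro numbers _hdom hpre
  unfold Spec_list_to_int_plus_one list_to_int_plus_one list_to_int_plus_one_alt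
  have hn : 0 < numbers.length := List.length_pos_iff.mpr hpre
  set i := numbers.length - 1 with hi
  set ns := numbers.set i (numbers.getD i 0 + 1) with hns
  have hilen : i < ns.length := by simp [hns]; omega
  have hz : ∀ (j : Nat), j < ns.length → i < j → ns.getD j 0 = 0 := by
    intro j hj hij
    simp [hns] at hj
    omega
  rw [pvListToInt_eq_pvH, pvCarryLoop_value i ns hilen hz, hns,
    pvH_set numbers i _ (by omega)]
  have : pvH 0 numbers = numbers.foldl (fun value d => value * 10 + d) 0 := rfl
  rw [← this]
  have hiexp : numbers.length - 1 - i = 0 := by omega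
  rw [hiexp]
  ring
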